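-- pv_equiv track=rewrite | github.com/gabriellaec/desoft-analise-exercicios | backup/user_357/ch140_2020_04_01_19_52_42_156650.py | faixa_notas
-- ===== SOURCE A (Python) =====
-- def faixa_notas(notas):
--     i = 0
--     menor_que_5 = 0
--     entre_5_e_7 = 0
--     maior_que_7 = 0
--     while i < len(notas):
--         if notas[i] < 5:
--             menor_que_5 += 1
--         elif notas[i] >= 5 and notas[i] <= 7:
--             entre_5_e_7 +=1
--         else:
--             maior_que_7 +=1
--         i+=1
--     lista_final = [menor_que_5, entre_5_e_7, maior_que_7]
--     return lista_final
-- ===== SOURCE B (Python) =====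
-- def faixa_notas(notas):
--     menor_que_5 = sum(1 for n in notas if n < 5)
--     entre_5_e_7 = sum(1 for n in notas if 5 <= n <= 7)
--     maior_que_7 = sum(1 for n in notas if n > 7)
--     return [menor_que_5, entre_5_e_7, maior_que_7]
-- ===== Notes on version B (the rewrite author's own statement) =====
-- stated objective: idiomatic
-- what changed: The single index-based while loop with branching is replaced by three independent scans of the list, one comprehension per bucket.
import Mathlib
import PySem

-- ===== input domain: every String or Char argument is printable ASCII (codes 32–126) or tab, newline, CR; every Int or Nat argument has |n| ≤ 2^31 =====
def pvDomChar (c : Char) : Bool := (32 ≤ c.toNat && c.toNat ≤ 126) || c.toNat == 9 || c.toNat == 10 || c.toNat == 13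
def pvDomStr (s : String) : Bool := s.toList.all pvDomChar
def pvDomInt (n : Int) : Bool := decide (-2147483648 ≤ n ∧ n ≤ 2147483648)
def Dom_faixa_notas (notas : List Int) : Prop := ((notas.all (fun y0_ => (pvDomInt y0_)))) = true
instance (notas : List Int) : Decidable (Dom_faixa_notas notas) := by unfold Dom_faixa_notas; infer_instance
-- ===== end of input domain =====

-- ===== PORT A =====
-- B: three independent scans (one per bucket) instead of one branching while loop; more idiomatic.
-- while loop over index i with three counters, ported as structural recursion over the list
def faixaLoop (rest : List Int) (m e g : Int) : List Int :=
  match rest with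
  | [] => [m, e, g]
  | n :: rest =>
    if n < 5 then faixaLoop rest (m + 1) e g
    else if 5 ≤ n ∧ n ≤ 7 then faixaLoop rest m (e + 1) g
    else faixaLoop rest m e (g + 1)

def faixa_notas (notas : List Int) : List Int := faixaLoop notas 0 0 0

-- ===== PORT B =====
def faixa_notas_alt (notas : List Int) : List Int :=
  [((notas.filter (fun n => n < 5)).map (fun _ => (1 : Int))).sum,
   ((notas.filter (fun n => 5 ≤ n ∧ n ≤ 7)).map (fun _ => (1 : Int))).sum,
   ((notas.filter (fun n => 7 < n)).map (fun _ => (1 : Int))).sum]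

-- ===== PRECONDITION & SPEC =====
def Spec_faixa_notas (notas : List Int) (out : List Int) : Prop := out = faixa_notas_alt notas
instance (notas : List Int) (out : List Int) : Decidable (Spec_faixa_notas notas out) := by unfold Spec_faixa_notas; infer_instance

-- ===== CLAIM (what is proved, stated in full; the proofs are below) =====
def Claim_equal_faixa_notas : Prop := ∀ (notas : List Int), Dom_faixa_notas notas → Spec_faixa_notas notas (faixa_notas notas)

-- ===== LEMMAS AND PROOFS =====

-- ===== VERDICT (by name: the statement is the Claim_ definition above) =====
def cnt (p : Int → Prop) [DecidablePred p] (xs : List Int) : Int :=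
  ((xs.filter (fun n => p n)).map (fun _ => (1 : Int))).sum

theorem faixaLoop_eq (xs : List Int) (m e g : Int) :
    faixaLoop xs m e g =
      [m + cnt (fun n => n < 5) xs,
       e + cnt (fun n => 5 ≤ n ∧ n ≤ 7) xs,
       g + cnt (fun n => 7 < n) xs] := by
  induction xs generalizing m e g with
  | nil => simp [faixaLoop, cnt]
  | cons x xs ih =>
    simp only [faixaLoop]
    split_ifs with h1 h2 <;>
      simp [ih, cnt, List.filter_cons] <;>
      split_ifs <;> simp_all <;> omega

theorem faixa_notas_spec : Claim_equal_faixa_notas := by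
  intro notas _
  unfold Spec_faixa_notas faixa_notas faixa_notas_alt
  rw [faixaLoop_eq]
  simp [cnt]
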